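-- pv_equiv track=rewrite | github.com/Sandrro/globalmapper_learning | postprocessing/buildings_generation.py | _transform_offsets
-- ===== SOURCE A (Python) =====
-- from typing import Dict, List, Optional, Tuple
--
-- def _transform_offsets(offsets: List[Tuple[int, int]], rot_k: int, mirror: bool) -> List[Tuple[int, int]]:
--     out = []
--     for (dr, dc) in offsets:
--         r, c = dr, dc
--         for _ in range(rot_k % 4):
--             r, c = c, -r
--         if mirror:
--             c = -c
--         out.append((r, c))
--     minr = min(r for r, _ in out); minc = min(c for _, c in out)
--     return [(r - minr, c - minc) for (r, c) in out]
-- ===== SOURCE B (Python) =====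
-- def _transform_offsets(offsets, rot_k, mirror):
--     k = rot_k % 4
--     if k == 0:
--         rotated = [(dr, dc) for dr, dc in offsets]
--     elif k == 1:
--         rotated = [(dc, -dr) for dr, dc in offsets]
--     elif k == 2:
--         rotated = [(-dr, -dc) for dr, dc in offsets]
--     else:
--         rotated = [(-dc, dr) for dr, dc in offsets]
--     if mirror:
--         rotated = [(r, -c) for r, c in rotated]
--     minr = min(r for r, _ in rotated)
--     minc = min(c for _, c in rotated)
--     return [(r - minr, c - minc) for r, c in rotated]
-- ===== Notes on version B (the rewrite author's own statement) =====
-- stated objective: simpler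
-- what changed: Replaces the per-offset repeated-quarter-turn inner loop with a single closed-form rotation chosen by branching on rot_k % 4, applied as whole-list comprehensions; normalization is unchanged.
import Mathlib
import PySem

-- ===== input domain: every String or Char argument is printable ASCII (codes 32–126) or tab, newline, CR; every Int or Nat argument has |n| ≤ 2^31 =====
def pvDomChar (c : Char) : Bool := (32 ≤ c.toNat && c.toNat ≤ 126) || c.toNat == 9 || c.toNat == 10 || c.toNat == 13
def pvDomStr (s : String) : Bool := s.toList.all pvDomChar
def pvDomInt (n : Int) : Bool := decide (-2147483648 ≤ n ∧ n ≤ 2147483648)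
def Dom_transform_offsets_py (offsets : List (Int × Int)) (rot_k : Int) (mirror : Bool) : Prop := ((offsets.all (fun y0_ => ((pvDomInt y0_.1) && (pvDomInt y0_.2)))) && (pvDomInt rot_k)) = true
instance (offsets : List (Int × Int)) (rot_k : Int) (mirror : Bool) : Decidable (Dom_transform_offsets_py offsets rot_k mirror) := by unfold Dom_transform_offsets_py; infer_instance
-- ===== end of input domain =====

-- B replaces A's per-offset repeated quarter-turn inner loop with a closed-form rotation
-- chosen by branching on rot_k % 4 (objective: simpler); normalization is unchanged.

-- ===== PORT A =====
-- the inner 'for _ in range(k): r, c = c, -r' loop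
def pvRotLoop : Nat → Int × Int → Int × Int
  | 0, p => p
  | n + 1, p => pvRotLoop n (p.2, -p.1)

-- the final normalization, textually identical in A and B:
-- minr = min(r ...); minc = min(c ...); return [(r - minr, c - minc) ...]
def pvNormalize (out : List (Int × Int)) : List (Int × Int) :=
  let minr := (PySem.List.min? (out.map Prod.fst) (fun x => x)).getD 0
  let minc := (PySem.List.min? (out.map Prod.snd) (fun x => x)).getD 0
  out.map (fun p => (p.1 - minr, p.2 - minc))

def transform_offsets_py (offsets : List (Int × Int)) (rot_k : Int) (mirror : Bool) : List (Int × Int) :=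
  let k := (PySem.Int.mod rot_k 4).toNat
  let out := offsets.foldl (fun acc p =>
    let rc := pvRotLoop k p
    let rc := if mirror then (rc.1, -rc.2) else rc
    acc ++ [rc]) []
  pvNormalize out

-- ===== PORT B =====
def transform_offsets_py_alt (offsets : List (Int × Int)) (rot_k : Int) (mirror : Bool) : List (Int × Int) :=
  let k := PySem.Int.mod rot_k 4
  let rotated :=
    if k = 0 then offsets.map (fun p => (p.1, p.2))
    else if k = 1 then offsets.map (fun p => (p.2, -p.1))
    else if k = 2 then offsets.map (fun p => (-p.1, -p.2))
    else offsets.map (fun p => (-p.2, p.1))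
  let rotated := if mirror then rotated.map (fun p => (p.1, -p.2)) else rotated
  pvNormalize rotated

-- ===== PRECONDITION & SPEC =====
-- Pre_ excludes only the empty list, on which A's min() raises ValueError (B's min() does too).
def Pre_transform_offsets_py (offsets : List (Int × Int)) (rot_k : Int) (mirror : Bool) : Prop := offsets ≠ []
instance (offsets : List (Int × Int)) (rot_k : Int) (mirror : Bool) : Decidable (Pre_transform_offsets_py offsets rot_k mirror) := by unfold Pre_transform_offsets_py; infer_instance
def pvWitness_transform_offsets_py : (List (Int × Int)) × Int × Bool := ([(1, -2), (0, 3)], 5, true)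

def Spec_transform_offsets_py (offsets : List (Int × Int)) (rot_k : Int) (mirror : Bool) (out : List (Int × Int)) : Prop := out = transform_offsets_py_alt offsets rot_k mirror
instance (offsets : List (Int × Int)) (rot_k : Int) (mirror : Bool) (out : List (Int × Int)) : Decidable (Spec_transform_offsets_py offsets rot_k mirror out) := by unfold Spec_transform_offsets_py; infer_instance

-- ===== CLAIM (what is proved, stated in full; the proofs are below) =====
def Claim_equal_transform_offsets_py : Prop := ∀ (offsets : List (Int × Int)) (rot_k : Int) (mirror : Bool), Dom_transform_offsets_py offsets rot_k mirror → Pre_transform_offsets_py offsets rot_k mirror → Spec_transform_offsets_py offsets rot_k mirror (transform_offsets_py offsets rot_k mirror)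

-- ===== LEMMAS AND PROOFS =====

theorem pvMod4_cases (n : Int) :
    PySem.Int.mod n 4 = 0 ∨ PySem.Int.mod n 4 = 1 ∨ PySem.Int.mod n 4 = 2 ∨ PySem.Int.mod n 4 = 3 := by
  have he : PySem.Int.mod n 4 = n % 4 := by
    simp only [PySem.Int.mod]
    rw [Int.fmod_eq_emod]
    simp
  rw [he]; omega

-- A's appended-out loop equals B's branch-selected map, for any value m of rot_k % 4
theorem pvOut_eq (offsets : List (Int × Int)) (m : Int) (mirror : Bool)
    (hm : m = 0 ∨ m = 1 ∨ m = 2 ∨ m = 3) :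
    offsets.foldl (fun acc p =>
      let rc := pvRotLoop m.toNat p
      let rc := if mirror then (rc.1, -rc.2) else rc
      acc ++ [rc]) [] =
    (let rotated :=
       if m = 0 then offsets.map (fun p => (p.1, p.2))
       else if m = 1 then offsets.map (fun p => (p.2, -p.1))
       else if m = 2 then offsets.map (fun p => (-p.1, -p.2))
       else offsets.map (fun p => (-p.2, p.1))
     if mirror then rotated.map (fun p => (p.1, -p.2)) else rotated) := by
  rw [PySem.List.foldl_append_singleton_eq_map]
  rcases hm with h | h | h | h <;> subst h <;>
    cases mirror <;> simp [pvRotLoop, List.map_map, Function.comp]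

theorem transform_offsets_py_eq (offsets : List (Int × Int)) (rot_k : Int) (mirror : Bool) :
    transform_offsets_py offsets rot_k mirror = transform_offsets_py_alt offsets rot_k mirror := by
  unfold transform_offsets_py transform_offsets_py_alt
  exact congrArg pvNormalize (pvOut_eq offsets (PySem.Int.mod rot_k 4) mirror (pvMod4_cases rot_k))

-- ===== VERDICT (by name: the statement is the Claim_ definition above) =====
theorem transform_offsets_py_spec : Claim_equal_transform_offsets_py := by
  intro offsets rot_k mirror _ _
  exact transform_offsets_py_eq offsets rot_k mirror
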